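-- pv_equiv track=rewrite | github.com/PerrineQhn/XiaoLearn | xiaolearn_anki/generate_audio_jobs.py | generate_audio_jobs
-- ===== SOURCE A (Python) =====
-- def generate_audio_jobs(words):
--     """Génère la liste des jobs audio"""
--     jobs = []
--     seen = set()
--
--     for word in words:
--         if word and word not in seen:
--             seen.add(word)
--             # Créer le nom du fichier audio
--             audio_filename = f"hsk1/hsk1_{word}.wav"
--             jobs.append({
--                 "text": word,
--                 "audio": audio_filename
--             })
--
--     return jobs
-- ===== SOURCE B (Python) =====
-- def generate_audio_jobs(words):
--     """Génère la liste des jobs audio"""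
--     jobs = []
--     remaining = [w for w in words if w]
--     while remaining:
--         head = remaining[0]
--         jobs.append({"text": head, "audio": f"hsk1/hsk1_{head}.wav"})
--         remaining = [w for w in remaining[1:] if w != head]
--     return jobs
-- ===== Notes on version B (the rewrite author's own statement) =====
-- stated objective: alternative
-- what changed: Replaces A's single pass with a seen-set by a worklist algorithm with no seen structure at all: filter truthy words once, then repeatedly emit the head and delete all its remaining duplicates from the worklist.
import Mathlib
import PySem

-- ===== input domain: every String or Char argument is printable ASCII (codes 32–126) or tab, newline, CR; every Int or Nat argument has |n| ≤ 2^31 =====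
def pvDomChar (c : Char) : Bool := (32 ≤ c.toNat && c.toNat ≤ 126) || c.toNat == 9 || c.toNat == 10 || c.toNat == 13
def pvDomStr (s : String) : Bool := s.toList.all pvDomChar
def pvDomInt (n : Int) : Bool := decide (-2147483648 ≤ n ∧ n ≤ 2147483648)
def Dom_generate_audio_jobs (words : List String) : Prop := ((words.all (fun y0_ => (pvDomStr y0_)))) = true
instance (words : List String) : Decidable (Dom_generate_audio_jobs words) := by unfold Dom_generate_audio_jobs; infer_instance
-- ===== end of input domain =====

-- B replaces A's seen-set single pass by a worklist algorithm: emit the head, delete its remaining duplicates, repeat; objective: alternative (same result, no seen structure).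

-- ===== PORT A =====
-- the job dict built for a word
def pvJob (w : String) : List (String × String) :=
  [("text", w), ("audio", "hsk1/hsk1_" ++ w ++ ".wav")]

def generate_audio_jobs (words : List String) : List (List (String × String)) :=
  (words.foldl
    (fun (st : List (List (String × String)) × PySem.Set String) word =>
      if word ≠ "" ∧ ¬ (PySem.Set.contains st.2 word = true) then
        (st.1 ++ [pvJob word], PySem.Set.add st.2 word)
      else st)
    ([], PySem.Set.empty)).1

-- ===== PORT B =====
-- the while-loop of B: pop the head, emit its job, filter its duplicates out of the worklist
def pvAltLoop (remaining : List String) : List (List (String × String)) :=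
  match remaining with
  | [] => []
  | head :: rest => pvJob head :: pvAltLoop (rest.filter (fun w => w ≠ head))
termination_by remaining.length
decreasing_by
  simp only [List.length_unattach]
  calc (List.filter _ rest.attach).length ≤ rest.attach.length := List.length_filter_le _ _
    _ = rest.length := List.length_attach
    _ < rest.length + 1 := Nat.lt_succ_self _

def generate_audio_jobs_alt (words : List String) : List (List (String × String)) :=
  pvAltLoop (words.filter (fun w => w ≠ ""))

-- ===== PRECONDITION & SPEC =====
def Spec_generate_audio_jobs (words : List String) (out : List (List (String × String))) : Prop := out = generate_audio_jobs_alt words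
instance (words : List String) (out : List (List (String × String))) : Decidable (Spec_generate_audio_jobs words out) := by unfold Spec_generate_audio_jobs; infer_instance

-- ===== CLAIM (what is proved, stated in full; the proofs are below) =====
def Claim_equal_generate_audio_jobs : Prop := ∀ (words : List String), Dom_generate_audio_jobs words → Spec_generate_audio_jobs words (generate_audio_jobs words)

-- ===== LEMMAS AND PROOFS =====

-- A-side loop invariant: the fused loop is map pvJob over the growing seen set
theorem pvLoop_invariant (ws : List String) (s : PySem.Set String) :
    (ws.foldl
      (fun (st : List (List (String × String)) × PySem.Set String) word =>
        if word ≠ "" ∧ ¬ (PySem.Set.contains st.2 word = true) then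
          (st.1 ++ [pvJob word], PySem.Set.add st.2 word)
        else st)
      (s.map pvJob, s)) =
    (((ws.filter (fun w => w ≠ "")).foldl PySem.Set.add s).map pvJob,
      (ws.filter (fun w => w ≠ "")).foldl PySem.Set.add s) := by
  induction ws generalizing s with
  | nil => rfl
  | cons w ws ih =>
    by_cases hw : w = ""
    · simpa [hw, List.filter] using ih s
    · by_cases hc : w ∈ s
      · have hadd : PySem.Set.add s w = s := by
          simp [PySem.Set.add, hc]
        simpa [List.foldl, List.filter, hw, hc, hadd] using ih s
      · have hcc : PySem.Set.contains s w = false := by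
          simpa [PySem.Set.contains_iff] using hc
        have hadd : PySem.Set.add s w = s ++ [w] := by simp [PySem.Set.add, hc]
        have := ih (s ++ [w])
        simpa [List.foldl, List.filter, hw, hc, hadd] using this

-- adding to a set already containing x ignores later occurrences of x
theorem pvFoldl_add_filter (l : List String) (s : PySem.Set String) (x : String)
    (hx : x ∈ s) :
    l.foldl PySem.Set.add s = (l.filter (fun w => w ≠ x)).foldl PySem.Set.add s := by
  induction l generalizing s with
  | nil => rfl
  | cons w l ih =>
    by_cases hw : w = x
    · subst hw
      have : PySem.Set.add s w = s := by simp [PySem.Set.add, hx]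
      simpa [List.filter, this] using ih s hx
    · have hx' : x ∈ PySem.Set.add s w := by
        simp [PySem.Set.add]; split <;> simp [hx]
      simpa [List.filter, hw] using ih (PySem.Set.add s w) hx'

-- a head absent from the rest stays in front of the accumulated set
theorem pvFoldl_add_cons (l : List String) (s : PySem.Set String) (h : String)
    (hh : h ∉ l) :
    l.foldl PySem.Set.add (h :: s) = h :: l.foldl PySem.Set.add s := by
  induction l generalizing s with
  | nil => rfl
  | cons w l ih =>
    have hwh : ¬ (w = h) := fun e => hh (e ▸ List.mem_cons_self ..)
    have hstep : PySem.Set.add (h :: s) w = h :: PySem.Set.add s w := by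
      simp [PySem.Set.add, hwh]
      split <;> simp
    rw [List.foldl_cons, hstep, List.foldl_cons]
    exact ih _ (fun m => hh (List.mem_cons_of_mem _ m))

-- B's worklist loop computes map pvJob over the ordered-unique elements
theorem pvAltLoop_eq (l : List String) :
    pvAltLoop l = (PySem.Set.ofList l).map pvJob := by
  induction hn : l.length using Nat.strong_induction_on generalizing l with
  | _ n ih =>
    match l, hn with
    | [], _ => rw [pvAltLoop.eq_def]; rfl
    | h :: t, hn =>
      have hlen : (t.filter (fun w => w ≠ h)).length < n := by
        subst hn
        exact Nat.lt_succ_of_le (List.length_filter_le _ _)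
      have hrec := ih _ hlen (t.filter (fun w => w ≠ h)) rfl
      have hnotin : h ∉ t.filter (fun w => w ≠ h) := by
        simp [List.mem_filter]
      have hset : PySem.Set.ofList (h :: t)
          = h :: PySem.Set.ofList (t.filter (fun w => w ≠ h)) := by
        have h1 : PySem.Set.ofList (h :: t)
            = t.foldl PySem.Set.add ([h] : PySem.Set String) := by
          simp [PySem.Set.ofList_eq_foldl, PySem.Set.add]
        rw [h1, pvFoldl_add_filter t ([h] : PySem.Set String) h (by simp),
            pvFoldl_add_cons _ _ _ hnotin, PySem.Set.ofList_eq_foldl]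
      conv_lhs => rw [pvAltLoop.eq_def]
      show pvJob h :: pvAltLoop (t.filter (fun w => w ≠ h))
          = (PySem.Set.ofList (h :: t)).map pvJob
      rw [hrec, hset, List.map_cons]

-- ===== VERDICT (by name: the statement is the Claim_ definition above) =====
theorem generate_audio_jobs_spec : Claim_equal_generate_audio_jobs := by
  intro words _
  unfold Spec_generate_audio_jobs generate_audio_jobs generate_audio_jobs_alt
  have h := pvLoop_invariant words PySem.Set.empty
  have e1 : (PySem.Set.empty : PySem.Set String).map pvJob = ([] : List (List (String × String))) := rfl
  rw [e1] at h
  rw [h, pvAltLoop_eq, PySem.Set.ofList_eq_foldl]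
  rfl
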